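-- pv_equiv track=rewrite | github.com/feiyuehchen/Lyrics-Reduplication | utils.py | find_reduplicate_pos
-- ===== SOURCE A (Python) =====
-- def find_reduplicate_pos(text_pairs):
--
--     dup_set = set()
--     if len(text_pairs) > 2:
--         for i in range(len(text_pairs)-1):
--             if text_pairs[i][0] == text_pairs[i+1][0]:
--                 dup_set.add(text_pairs[i])
--                 dup_set.add(text_pairs[i+1])
--
--     return dup_set
-- ===== SOURCE B (Python) =====
-- def find_reduplicate_pos(text_pairs):
--     # Partition the list into maximal runs of consecutive pairs sharing the
--     # same first element; every run of length >= 2 contributes all its pairs.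
--     dup_set = set()
--     if len(text_pairs) > 2:
--         n = len(text_pairs)
--         i = 0
--         while i < n:
--             j = i + 1
--             while j < n and text_pairs[j][0] == text_pairs[i][0]:
--                 j += 1
--             if j - i >= 2:
--                 dup_set.update(text_pairs[i:j])
--             i = j
--     return dup_set
-- ===== Notes on version B (the rewrite author's own statement) =====
-- stated objective: alternative
-- what changed: Instead of comparing each adjacent index pair and adding both endpoints to the set, B partitions the list into maximal runs of consecutive pairs with equal first element and adds every run of length >= 2 wholesale.
import Mathlib
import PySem

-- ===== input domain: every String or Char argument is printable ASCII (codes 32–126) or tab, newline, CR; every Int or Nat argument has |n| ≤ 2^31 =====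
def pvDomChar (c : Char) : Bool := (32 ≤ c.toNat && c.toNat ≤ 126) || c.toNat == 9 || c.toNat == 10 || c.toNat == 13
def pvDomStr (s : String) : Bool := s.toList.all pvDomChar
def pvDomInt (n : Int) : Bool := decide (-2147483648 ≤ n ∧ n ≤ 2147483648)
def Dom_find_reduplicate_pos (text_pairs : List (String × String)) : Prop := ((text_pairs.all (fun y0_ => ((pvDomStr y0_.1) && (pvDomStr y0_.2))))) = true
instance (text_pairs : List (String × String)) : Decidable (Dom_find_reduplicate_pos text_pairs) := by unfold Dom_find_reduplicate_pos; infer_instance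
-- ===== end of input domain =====

-- B replaces A's adjacent-index comparisons by a partition into maximal runs of
-- equal first components (runs of length ≥ 2 are added wholesale); alternative
-- decomposition, same output set in the same insertion order.

-- ===== PORT A =====
def find_reduplicate_pos (text_pairs : List (String × String)) : List (String × String) :=
  let dup_set : PySem.Set (String × String) := PySem.Set.empty
  if text_pairs.length > 2 then
    (PySem.List.pyRange 0 ((text_pairs.length : Int) - 1) 1).foldl
      (fun s i =>
        if (PySem.List.pyGetD text_pairs i ("", "")).1
            == (PySem.List.pyGetD text_pairs (i + 1) ("", "")).1 then
          PySem.Set.add (PySem.Set.add s (PySem.List.pyGetD text_pairs i ("", "")))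
            (PySem.List.pyGetD text_pairs (i + 1) ("", ""))
        else s)
      dup_set
  else dup_set

-- ===== PORT B =====
-- the run starting at index i: text_pairs[i:j] = head :: takeWhile (same key); rest = dropWhile
def pvRuns : List (String × String) → List (List (String × String))
  | [] => []
  | x :: xs =>
    (x :: xs.takeWhile (fun y => y.1 == x.1)) :: pvRuns (xs.dropWhile (fun y => y.1 == x.1))
termination_by l => l.length
decreasing_by
  exact Nat.lt_succ_of_le (List.length_dropWhile_le _ _)

def find_reduplicate_pos_alt (text_pairs : List (String × String)) : List (String × String) :=
  if text_pairs.length > 2 then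
    (pvRuns text_pairs).foldl
      (fun s run => if 2 ≤ run.length then PySem.Set.update s run else s)
      PySem.Set.empty
  else PySem.Set.empty

-- ===== PRECONDITION & SPEC =====
def Spec_find_reduplicate_pos (text_pairs : List (String × String)) (out : List (String × String)) : Prop := out = find_reduplicate_pos_alt text_pairs
instance (text_pairs : List (String × String)) (out : List (String × String)) : Decidable (Spec_find_reduplicate_pos text_pairs out) := by unfold Spec_find_reduplicate_pos; infer_instance

-- ===== CLAIM (what is proved, stated in full; the proofs are below) =====
def Claim_equal_find_reduplicate_pos : Prop := ∀ (text_pairs : List (String × String)), Dom_find_reduplicate_pos text_pairs → Spec_find_reduplicate_pos text_pairs (find_reduplicate_pos text_pairs)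

-- ===== LEMMAS AND PROOFS =====

-- structural form of A's loop: walk adjacent elements
def pvAdjFold : List (String × String) → PySem.Set (String × String) → PySem.Set (String × String)
  | x :: y :: rest, s =>
    pvAdjFold (y :: rest) (if x.1 == y.1 then PySem.Set.add (PySem.Set.add s x) y else s)
  | _, s => s

theorem pvAdd_add_same (s : PySem.Set (String × String)) (y : String × String) :
    PySem.Set.add (PySem.Set.add s y) y = PySem.Set.add s y := by
  simp [PySem.Set.add, PySem.Set.contains]
  split <;> simp_all

-- A's index loop equals the structural adjacent walk
theorem pvLoopA_eq (xs : List (String × String)) (s : PySem.Set (String × String)) :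
    (List.range (xs.length - 1)).foldl
      (fun s k =>
        if (xs.getD k ("", "")).1 == (xs.getD (k + 1) ("", "")).1 then
          PySem.Set.add (PySem.Set.add s (xs.getD k ("", ""))) (xs.getD (k + 1) ("", ""))
        else s) s = pvAdjFold xs s := by
  induction xs generalizing s with
  | nil => simp [pvAdjFold]
  | cons x xs ih =>
    cases xs with
    | nil => simp [pvAdjFold]
    | cons y t =>
      have hlen : (x :: y :: t).length - 1 = (y :: t).length - 1 + 1 := by simp
      rw [hlen, List.range_succ_eq_map, List.foldl_cons, List.foldl_map]
      have hf : (fun (s : PySem.Set (String × String)) (k : Nat) =>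
            if ((x :: y :: t).getD (k + 1) ("", "")).1
                == ((x :: y :: t).getD (k + 1 + 1) ("", "")).1 then
              PySem.Set.add (PySem.Set.add s ((x :: y :: t).getD (k + 1) ("", "")))
                ((x :: y :: t).getD (k + 1 + 1) ("", ""))
            else s)
          = (fun (s : PySem.Set (String × String)) (k : Nat) =>
            if ((y :: t).getD k ("", "")).1 == ((y :: t).getD (k + 1) ("", "")).1 then
              PySem.Set.add (PySem.Set.add s ((y :: t).getD k ("", ""))) ((y :: t).getD (k + 1) ("", ""))
            else s) := by
        funext s k
        rw [List.getD_cons_succ]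
        rw [show (x :: y :: t).getD (k + 1 + 1) ("", "") = (y :: t).getD (k + 1) ("", "") from
          List.getD_cons_succ]
      rw [hf, ih]
      simp [pvAdjFold]

-- the adjacent walk over one maximal run, then the rest
theorem pvRunStep (run : List (String × String)) :
    ∀ (x : String × String) (rest : List (String × String)) (s : PySem.Set (String × String)),
      (∀ y ∈ run, (y.1 == x.1) = true) →
      (∀ r ∈ rest.head?, (r.1 == x.1) = false) →
      pvAdjFold (x :: (run ++ rest)) s =
        pvAdjFold rest (if run.isEmpty then s else List.foldl PySem.Set.add s (x :: run)) := by
  induction run with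
  | nil =>
    intro x rest s _ hrest
    cases rest with
    | nil => simp [pvAdjFold]
    | cons r rs =>
      have : (x.1 == r.1) = false := by
        have := hrest r (by simp)
        simp_all [BEq.comm]
      simp [pvAdjFold, this]
  | cons y run' ih =>
    intro x rest s hrun hrest
    have hxy : (x.1 == y.1) = true := by
      have := hrun y (by simp)
      simp_all [BEq.comm]
    have hyx : y.1 = x.1 := by
      have := hrun y (by simp); exact eq_of_beq this
    have hrun' : ∀ z ∈ run', (z.1 == y.1) = true := by
      intro z hz
      have := hrun z (by simp [hz])
      rw [hyx]; exact this
    have hrest' : ∀ r ∈ rest.head?, (r.1 == y.1) = false := by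
      intro r hr; rw [hyx]; exact hrest r hr
    show pvAdjFold (y :: (run' ++ rest)) _ = _
    rw [hxy]
    simp only [if_true]
    rw [ih y rest (PySem.Set.add (PySem.Set.add s x) y) hrun' hrest']
    cases run' with
    | nil => simp
    | cons z t =>
      simp only [List.isEmpty_cons, List.foldl_cons]
      rw [pvAdd_add_same]
      simp

theorem pvTakeWhile_mem (p : (String × String) → Bool) (xs : List (String × String)) :
    ∀ y ∈ xs.takeWhile p, p y = true := by
  induction xs with
  | nil => simp
  | cons x t ih =>
    intro y hy
    by_cases h : p x
    · rw [List.takeWhile_cons_of_pos h] at hy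
      rcases List.mem_cons.mp hy with h1 | h1
      · subst h1; exact h
      · exact ih y h1
    · rw [List.takeWhile_cons_of_neg h] at hy; simp at hy

theorem pvHead_dropWhile (p : (String × String) → Bool) (xs : List (String × String)) :
    ∀ r ∈ (xs.dropWhile p).head?, p r = false := by
  induction xs with
  | nil => simp
  | cons x t ih =>
    intro r hr
    by_cases h : p x
    · rw [List.dropWhile_cons_of_pos h] at hr; exact ih r hr
    · rw [List.dropWhile_cons_of_neg h] at hr
      simp at hr
      subst hr; simpa using h

-- the adjacent walk equals B's fold over the maximal runs
theorem pvAdj_eq_runs (xs : List (String × String)) :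
    ∀ s, pvAdjFold xs s =
      (pvRuns xs).foldl
        (fun s run => if 2 ≤ run.length then PySem.Set.update s run else s) s := by
  induction xs using pvRuns.induct with
  | case1 => intro s; simp [pvRuns, pvAdjFold]
  | case2 x t ih =>
    intro s
    have hsplit : t = t.takeWhile (fun y => y.1 == x.1) ++ t.dropWhile (fun y => y.1 == x.1) :=
      (List.takeWhile_append_dropWhile).symm
    rw [pvRuns, List.foldl_cons]
    conv_lhs => rw [hsplit]
    rw [pvRunStep (t.takeWhile (fun y => y.1 == x.1)) x (t.dropWhile (fun y => y.1 == x.1)) s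
        (fun y hy => pvTakeWhile_mem _ _ _ hy)
        (pvHead_dropWhile _ t)]
    rw [ih]
    congr 1
    cases htk : t.takeWhile (fun y => y.1 == x.1) with
    | nil => simp
    | cons z zs =>
      simp [PySem.Set.update]

-- ===== VERDICT (by name: the statement is the Claim_ definition above) =====
theorem find_reduplicate_pos_spec : Claim_equal_find_reduplicate_pos := by
  intro tp _
  unfold Spec_find_reduplicate_pos find_reduplicate_pos find_reduplicate_pos_alt
  by_cases h : tp.length > 2
  · simp only [h, if_true]
    rw [show ((tp.length : Int) - 1) = (((tp.length - 1 : Nat)) : Int) by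
      have : 2 < tp.length := h; omega]
    rw [PySem.List.pyRange_zero_nat]
    rw [List.foldl_map]
    have : ∀ (s : PySem.Set (String × String)),
        (List.range (tp.length - 1)).foldl
          (fun s (k : Nat) =>
            if (PySem.List.pyGetD tp (k : Int) ("", "")).1
                == (PySem.List.pyGetD tp ((k : Int) + 1) ("", "")).1 then
              PySem.Set.add (PySem.Set.add s (PySem.List.pyGetD tp (k : Int) ("", "")))
                (PySem.List.pyGetD tp ((k : Int) + 1) ("", ""))
            else s) s
        = (List.range (tp.length - 1)).foldl
          (fun s k =>
            if (tp.getD k ("", "")).1 == (tp.getD (k + 1) ("", "")).1 then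
              PySem.Set.add (PySem.Set.add s (tp.getD k ("", ""))) (tp.getD (k + 1) ("", ""))
            else s) s := by
      intro s
      apply PySem.List.foldl_congr_mem
      intro s' k _
      have h1 : ((k : Int) + 1) = (((k + 1 : Nat)) : Int) := by push_cast; ring
      rw [h1, PySem.List.pyGetD_natCast, PySem.List.pyGetD_natCast]
    rw [this, pvLoopA_eq, pvAdj_eq_runs]
  · simp [h]
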